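-- pv_equiv track=rewrite | github.com/akhimass/CLTCrownAnalytics | analysis/driver_analysis.py | categorize_promo
-- ===== SOURCE A (Python) =====
-- def categorize_promo(name):
--     name = str(name).lower()
--     if any(k in name for k in ["giveaway", "gift", "jersey", "shirt", "hat", "towel", "scarf", "cape", "glove"]):
--         return "giveaway"
--     if any(k in name for k in ["fireworks"]):
--         return "fireworks"
--     if any(k in name for k in ["night", "appreciation", "tribute", "pride", "cultura", "juneteenth", "military"]):
--         return "theme_night"
--     if any(k in name for k in ["$1", "discount", "dollar", "thirsty"]):
--         return "discount"
--     if any(k in name for k in ["bark", "dog"]):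
--         return "bark_in_ballpark"
--     return "other"
-- ===== SOURCE B (Python) =====
-- # Flat (keyword, priority) index; one pass with a running minimum of matched
-- # priorities, then label lookup -- no ordered per-category branches.
-- _KEYWORD_PRIORITY = [
--     ("giveaway", 0), ("gift", 0), ("jersey", 0), ("shirt", 0), ("hat", 0),
--     ("towel", 0), ("scarf", 0), ("cape", 0), ("glove", 0),
--     ("fireworks", 1),
--     ("night", 2), ("appreciation", 2), ("tribute", 2), ("pride", 2),
--     ("cultura", 2), ("juneteenth", 2), ("military", 2),
--     ("$1", 3), ("discount", 3), ("dollar", 3), ("thirsty", 3),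
--     ("bark", 4), ("dog", 4),
-- ]
-- _LABELS = ["giveaway", "fireworks", "theme_night", "discount", "bark_in_ballpark"]
--
-- def categorize_promo(name):
--     name = str(name).lower()
--     best = None
--     for kw, prio in _KEYWORD_PRIORITY:
--         if kw in name:
--             best = prio if best is None else min(best, prio)
--     return _LABELS[best] if best is not None else "other"
-- ===== Notes on version B (the rewrite author's own statement) =====
-- stated objective: alternative
-- what changed: Replaces the ordered if-chain with early returns by a single flat pass over a (keyword, priority) index that keeps a running minimum of matched priorities and finally maps the minimum to its label.
import Mathlib
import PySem

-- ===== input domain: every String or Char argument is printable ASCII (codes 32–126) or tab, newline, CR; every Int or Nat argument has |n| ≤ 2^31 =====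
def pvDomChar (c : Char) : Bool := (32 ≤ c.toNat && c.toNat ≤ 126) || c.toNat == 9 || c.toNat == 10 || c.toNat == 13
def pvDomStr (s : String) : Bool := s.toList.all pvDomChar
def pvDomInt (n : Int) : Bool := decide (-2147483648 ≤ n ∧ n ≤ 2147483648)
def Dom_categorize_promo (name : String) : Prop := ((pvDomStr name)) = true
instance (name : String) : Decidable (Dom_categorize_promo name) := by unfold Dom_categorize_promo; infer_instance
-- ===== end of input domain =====

-- B replaces A's ordered if-chain by a flat (keyword, priority) index scanned once with a
-- running minimum of matched priorities (alternative decomposition, same cost).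


-- ===== PORT A =====
def categorize_promo (name : String) : String :=
  let n := PySem.Str.lower name
  if (["giveaway", "gift", "jersey", "shirt", "hat", "towel", "scarf", "cape", "glove"] : List String).any (fun k => PySem.Str.isIn k n) then "giveaway"
  else if (["fireworks"] : List String).any (fun k => PySem.Str.isIn k n) then "fireworks"
  else if (["night", "appreciation", "tribute", "pride", "cultura", "juneteenth", "military"] : List String).any (fun k => PySem.Str.isIn k n) then "theme_night"
  else if (["$1", "discount", "dollar", "thirsty"] : List String).any (fun k => PySem.Str.isIn k n) then "discount"
  else if (["bark", "dog"] : List String).any (fun k => PySem.Str.isIn k n) then "bark_in_ballpark"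
  else "other"

-- ===== PORT B =====
-- `prio if best is None else min(best, prio)` from Source B's loop body
def promoMin (best : Option Nat) (prio : Nat) : Nat :=
  match best with | none => prio | some b => min b prio

-- the body of Source B's for-loop
def promoStep (n : String) (best : Option Nat) (p : String × Nat) : Option Nat :=
  if PySem.Str.isIn p.1 n then some (promoMin best p.2) else best

def kwPrio : List (String × Nat) :=
  [("giveaway", 0), ("gift", 0), ("jersey", 0), ("shirt", 0), ("hat", 0),
   ("towel", 0), ("scarf", 0), ("cape", 0), ("glove", 0),
   ("fireworks", 1),
   ("night", 2), ("appreciation", 2), ("tribute", 2), ("pride", 2),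
   ("cultura", 2), ("juneteenth", 2), ("military", 2),
   ("$1", 3), ("discount", 3), ("dollar", 3), ("thirsty", 3),
   ("bark", 4), ("dog", 4)]

def promoLabels : List String :=
  ["giveaway", "fireworks", "theme_night", "discount", "bark_in_ballpark"]

def categorize_promo_alt (name : String) : String :=
  let n := PySem.Str.lower name
  match kwPrio.foldl (promoStep n) none with
  | none => "other"
  | some b => promoLabels.getD b "other"

-- ===== PRECONDITION & SPEC =====
def Spec_categorize_promo (name : String) (out : String) : Prop := out = categorize_promo_alt name
instance (name : String) (out : String) : Decidable (Spec_categorize_promo name out) := by unfold Spec_categorize_promo; infer_instance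

-- ===== CLAIM (what is proved, stated in full; the proofs are below) =====
def Claim_equal_categorize_promo : Prop := ∀ (name : String), Dom_categorize_promo name → Spec_categorize_promo name (categorize_promo name)

-- ===== LEMMAS AND PROOFS =====

-- folding promoStep over one priority group = "if any keyword matches, take the min, else keep best"
theorem pv_group_fold (n : String) (ks : List String) (i : Nat) (best : Option Nat) :
    List.foldl (promoStep n) best (ks.map (fun k => (k, i)))
      = if (ks.any (fun k => PySem.Str.isIn k n)) = true then some (promoMin best i) else best := by
  induction ks generalizing best with
  | nil => simp
  | cons k ks ih =>
    simp only [List.map_cons, List.foldl_cons, List.any_cons, promoStep]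
    by_cases h : PySem.Str.isIn k n = true
    · rw [if_pos h, ih]
      simp only [h, Bool.true_or, reduceIte]
      split_ifs with ha
      · cases best <;> simp [promoMin]
      · rfl
    · rw [if_neg h, ih]
      rw [Bool.not_eq_true] at h
      simp only [h, Bool.false_or]

theorem pv_kwPrio_split :
    kwPrio = (["giveaway", "gift", "jersey", "shirt", "hat", "towel", "scarf", "cape", "glove"].map (fun k => (k, 0)))
      ++ (["fireworks"].map (fun k => (k, 1)))
      ++ (["night", "appreciation", "tribute", "pride", "cultura", "juneteenth", "military"].map (fun k => (k, 2)))
      ++ (["$1", "discount", "dollar", "thirsty"].map (fun k => (k, 3)))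
      ++ (["bark", "dog"].map (fun k => (k, 4))) := by rfl

-- ===== VERDICT (by name: the statement is the Claim_ definition above) =====
theorem categorize_promo_spec : Claim_equal_categorize_promo := by
  intro name _
  unfold Spec_categorize_promo categorize_promo categorize_promo_alt
  set n := PySem.Str.lower name with hn
  rw [pv_kwPrio_split]
  simp only [List.foldl_append]
  rw [pv_group_fold, pv_group_fold, pv_group_fold, pv_group_fold, pv_group_fold]
  by_cases h0 : (["giveaway", "gift", "jersey", "shirt", "hat", "towel", "scarf", "cape", "glove"] : List String).any (fun k => PySem.Str.isIn k n) = true <;>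
  by_cases h1 : (["fireworks"] : List String).any (fun k => PySem.Str.isIn k n) = true <;>
  by_cases h2 : (["night", "appreciation", "tribute", "pride", "cultura", "juneteenth", "military"] : List String).any (fun k => PySem.Str.isIn k n) = true <;>
  by_cases h3 : (["$1", "discount", "dollar", "thirsty"] : List String).any (fun k => PySem.Str.isIn k n) = true <;>
  by_cases h4 : (["bark", "dog"] : List String).any (fun k => PySem.Str.isIn k n) = true <;>
  simp only [Bool.not_eq_true] at h0 h1 h2 h3 h4 <;>
  simp only [h0, h1, h2, h3, h4] <;>
  simp [promoMin, promoLabels]
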